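-- pv_equiv track=rewrite | github.com/misprit7/chesspiler | chesspiler/txt_to_board.py | build_board_array
-- ===== SOURCE A (Python) =====
-- PIECE_ID_TO_SYMBOL = {
--     0: 'P',  # White Pawn
--     1: 'p',  # Black Pawn
--     2: 'R',  # White Rook
--     3: 'r',  # Black Rook
--     4: 'N',  # White Knight
--     5: 'n',  # Black Knight
--     6: 'B',  # White Bishop
--     7: 'b',  # Black Bishop
--     8: 'Q',  # White Queen
--     9: 'q',  # Black Queen
--     10: 'K', # White King
--     11: 'k', # Black King
--     # Add more if needed
-- }
--
-- def build_board_array(pieces, min_x, max_x, min_y, max_y):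
--     width = max_x - min_x + 1
--     height = max_y - min_y + 1
--     board = [['.' for _ in range(width)] for _ in range(height)]  # board[y][x]
--     for pid, x, y in pieces:
--         if min_x <= x <= max_x and min_y <= y <= max_y:
--             arr_x = x - min_x
--             arr_y = y - min_y
--             symbol = PIECE_ID_TO_SYMBOL.get(pid, '?')
--             board[arr_y][arr_x] = symbol
--     return board
-- ===== SOURCE B (Python) =====
-- PIECE_ID_TO_SYMBOL = {
--     0: 'P', 1: 'p', 2: 'R', 3: 'r', 4: 'N', 5: 'n',
--     6: 'B', 7: 'b', 8: 'Q', 9: 'q', 10: 'K', 11: 'k',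
-- }
--
-- def build_board_array(pieces, min_x, max_x, min_y, max_y):
--     # Dense gather: for each cell, scan the pieces from last to first and take
--     # the first one landing on that cell (= last writer in A); no grid mutation,
--     # no staging structure. Cells range over the real coordinates, so the bounds
--     # filter is implicit in the equality test.
--     rev = pieces[::-1]
--
--     def cell(cx, cy):
--         for pid, x, y in rev:
--             if x == cx and y == cy:
--                 return PIECE_ID_TO_SYMBOL.get(pid, '?')
--         return '.'
--
--     return [[cell(cx, cy) for cx in range(min_x, max_x + 1)]
--             for cy in range(min_y, max_y + 1)]
-- ===== Notes on version B (the rewrite author's own statement) =====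
-- stated objective: alternative
-- what changed: A scatters pieces into a prefilled mutable grid; B builds no grid at all and computes each cell independently by a reverse linear search over the pieces for the last piece landing on that cell (scatter turned into per-cell gather).
import Mathlib
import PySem

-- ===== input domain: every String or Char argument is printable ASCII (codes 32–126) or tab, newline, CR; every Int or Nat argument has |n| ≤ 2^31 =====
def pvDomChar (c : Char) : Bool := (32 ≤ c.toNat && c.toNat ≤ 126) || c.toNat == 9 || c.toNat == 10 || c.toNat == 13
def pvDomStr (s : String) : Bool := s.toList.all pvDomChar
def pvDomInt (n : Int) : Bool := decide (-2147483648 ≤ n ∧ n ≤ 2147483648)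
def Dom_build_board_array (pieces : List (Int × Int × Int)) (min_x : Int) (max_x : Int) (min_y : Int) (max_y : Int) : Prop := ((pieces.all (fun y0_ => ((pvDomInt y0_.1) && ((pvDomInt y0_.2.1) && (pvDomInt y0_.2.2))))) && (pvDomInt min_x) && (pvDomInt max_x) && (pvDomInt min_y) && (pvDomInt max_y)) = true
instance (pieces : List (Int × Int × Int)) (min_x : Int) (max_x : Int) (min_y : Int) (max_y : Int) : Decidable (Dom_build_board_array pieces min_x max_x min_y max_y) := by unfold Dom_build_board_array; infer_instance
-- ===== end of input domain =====

-- B replaces A's scatter-into-a-prefilled-mutable-grid with a per-cell gather: each cell is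
-- computed independently by a reverse linear search over the pieces (objective: alternative).

-- ===== PORT A =====
-- the module constant PIECE_ID_TO_SYMBOL (shared context of both versions)
def pvPieceSymbols : PySem.Dict Int String :=
  PySem.Dict.ofList [(0, "P"), (1, "p"), (2, "R"), (3, "r"), (4, "N"), (5, "n"),
                     (6, "B"), (7, "b"), (8, "Q"), (9, "q"), (10, "K"), (11, "k")]

-- one iteration of A's `for pid, x, y in pieces` loop (board[arr_y][arr_x] = symbol as a functional
-- update; the guard guarantees both indices are nonnegative and in range, so toNat indexing is exact)
def pvAStep (min_x max_x min_y max_y : Int) (board : List (List String)) (p : Int × Int × Int) : List (List String) :=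
  if min_x ≤ p.2.1 ∧ p.2.1 ≤ max_x ∧ min_y ≤ p.2.2 ∧ p.2.2 ≤ max_y then
    board.modify (p.2.2 - min_y).toNat
      (fun row => row.set (p.2.1 - min_x).toNat (pvPieceSymbols.getD p.1 "?"))
  else board

-- range(height)/range(width) of A's prefill comprehension ported as List.range n.toNat (empty when n ≤ 0, as in Python)
def build_board_array (pieces : List (Int × Int × Int)) (min_x : Int) (max_x : Int) (min_y : Int) (max_y : Int) : List (List String) :=
  pieces.foldl (pvAStep min_x max_x min_y max_y)
    ((List.range (max_y - min_y + 1).toNat).map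
      (fun _ => (List.range (max_x - min_x + 1).toNat).map (fun _ => ".")))

-- ===== PORT B =====
-- B's inner `cell` helper: the for-loop over rev with early return, as structural recursion
def pvCell (rev : List (Int × Int × Int)) (cx cy : Int) : String :=
  match rev with
  | [] => "."
  | p :: ps => if p.2.1 = cx ∧ p.2.2 = cy then pvPieceSymbols.getD p.1 "?" else pvCell ps cx cy

-- pieces[::-1] → List.reverse; range(min_x, max_x+1) → PySem.List.pyRange
def build_board_array_alt (pieces : List (Int × Int × Int)) (min_x : Int) (max_x : Int) (min_y : Int) (max_y : Int) : List (List String) :=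
  let rev := pieces.reverse
  (PySem.List.pyRange min_y (max_y + 1) 1).map
    (fun cy => (PySem.List.pyRange min_x (max_x + 1) 1).map (fun cx => pvCell rev cx cy))

-- ===== PRECONDITION & SPEC =====
def Spec_build_board_array (pieces : List (Int × Int × Int)) (min_x : Int) (max_x : Int) (min_y : Int) (max_y : Int) (out : List (List String)) : Prop := out = build_board_array_alt pieces min_x max_x min_y max_y
instance (pieces : List (Int × Int × Int)) (min_x : Int) (max_x : Int) (min_y : Int) (max_y : Int) (out : List (List String)) : Decidable (Spec_build_board_array pieces min_x max_x min_y max_y out) := by unfold Spec_build_board_array; infer_instance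

-- ===== CLAIM =====
def Claim_equal_build_board_array : Prop := ∀ (pieces : List (Int × Int × Int)) (min_x : Int) (max_x : Int) (min_y : Int) (max_y : Int), Dom_build_board_array pieces min_x max_x min_y max_y → Spec_build_board_array pieces min_x max_x min_y max_y (build_board_array pieces min_x max_x min_y max_y)

-- ===== LEMMAS AND PROOFS =====

-- pvCell is a find?-then-symbol
lemma pvCell_eq_find? (l : List (Int × Int × Int)) (cx cy : Int) :
    pvCell l cx cy = ((l.find? (fun p => p.2.1 == cx && p.2.2 == cy)).map
      (fun p => pvPieceSymbols.getD p.1 "?")).getD "." := by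
  induction l with
  | nil => rfl
  | cons p ps ih =>
    by_cases h : p.2.1 = cx ∧ p.2.2 = cy
    · simp [pvCell, List.find?, h]
    · have hb : (p.2.1 == cx && p.2.2 == cy) = false := by
        simp only [Bool.and_eq_false_iff, beq_eq_false_iff_ne]; tauto
      simp [pvCell, List.find?, hb, h, ih]

-- loop invariant: A's scatter, cell for cell, is the reverse-find? gather, falling back to
-- the incoming board's cell when no piece of ps hits the cell
lemma pvInv (min_x max_x min_y max_y : Int) (ps : List (Int × Int × Int)) :
    ∀ (board : List (List String)),
    board.length = (max_y - min_y + 1).toNat →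
    (∀ i (h : i < board.length), (board[i]'h).length = (max_x - min_x + 1).toNat) →
    (ps.foldl (pvAStep min_x max_x min_y max_y) board).length = (max_y - min_y + 1).toNat ∧
    (∀ i (h : i < (ps.foldl (pvAStep min_x max_x min_y max_y) board).length),
        ((ps.foldl (pvAStep min_x max_x min_y max_y) board)[i]'h).length = (max_x - min_x + 1).toNat) ∧
    (∀ ay ax (hy : ay < (ps.foldl (pvAStep min_x max_x min_y max_y) board).length)
        (hx : ax < ((ps.foldl (pvAStep min_x max_x min_y max_y) board)[ay]'hy).length)
        (hy' : ay < board.length) (hx' : ax < (board[ay]'hy').length),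
        ((ps.foldl (pvAStep min_x max_x min_y max_y) board)[ay]'hy)[ax]'hx
          = ((ps.reverse.find? (fun p => p.2.1 == min_x + (ax : Int) && p.2.2 == min_y + (ay : Int))).map
              (fun p => pvPieceSymbols.getD p.1 "?")).getD ((board[ay]'hy')[ax]'hx')) := by
  induction ps with
  | nil => intro board hlen hrow; exact ⟨hlen, hrow, by intro ay ax hy hx hy' hx'; simp⟩
  | cons p ps ih =>
    intro board hlen hrow
    simp only [List.foldl_cons]
    have hstep_len : (pvAStep min_x max_x min_y max_y board p).length = (max_y - min_y + 1).toNat := by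
      unfold pvAStep; split_ifs <;> simp [hlen]
    have hstep_row : ∀ i (h : i < (pvAStep min_x max_x min_y max_y board p).length),
        ((pvAStep min_x max_x min_y max_y board p)[i]'h).length = (max_x - min_x + 1).toNat := by
      intro i h
      unfold pvAStep at h ⊢
      split_ifs at h ⊢ with hc
      · have h' : i < board.length := by simpa using h
        simp only [List.getElem_modify]
        split_ifs with hA
        · simp [List.length_set, hrow i h']
        · exact hrow i h'
      · exact hrow i h
    obtain ⟨l1, l2, l3⟩ := ih (pvAStep min_x max_x min_y max_y board p) hstep_len hstep_row
    refine ⟨l1, l2, ?_⟩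
    intro ay ax hy hx hy' hx'
    have hys : ay < (pvAStep min_x max_x min_y max_y board p).length := by omega
    have hxs : ax < ((pvAStep min_x max_x min_y max_y board p)[ay]'hys).length := by
      rw [hstep_row ay hys]; rw [hrow ay hy'] at hx'; exact hx'
    rw [l3 ay ax hy hx hys hxs]
    rw [List.reverse_cons, List.find?_append]
    -- bounds of the cell's real coordinates
    have hW : (ax : Int) < max_x - min_x + 1 := by
      have := hx'; rw [hrow ay hy'] at this
      have : (ax : Int) < ((max_x - min_x + 1).toNat : Int) := by exact_mod_cast this
      omega
    have hH : (ay : Int) < max_y - min_y + 1 := by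
      have : (ay : Int) < ((max_y - min_y + 1).toNat : Int) := by exact_mod_cast hy'.trans_eq hlen
      omega
    cases hfind : ps.reverse.find? (fun p => p.2.1 == min_x + (ax : Int) && p.2.2 == min_y + (ay : Int)) with
    | some q => simp [Option.or]
    | none =>
      -- reduce to the single step
      by_cases hm : p.2.1 = min_x + (ax : Int) ∧ p.2.2 = min_y + (ay : Int)
      · -- the piece lands exactly on this cell (hence it is in bounds)
        have hc : min_x ≤ p.2.1 ∧ p.2.1 ≤ max_x ∧ min_y ≤ p.2.2 ∧ p.2.2 ≤ max_y := by omega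
        have hay : (p.2.2 - min_y).toNat = ay := by omega
        have hax : (p.2.1 - min_x).toNat = ax := by omega
        have hfp : List.find? (fun p => p.2.1 == min_x + (ax : Int) && p.2.2 == min_y + (ay : Int)) [p]
            = some p := by simp [List.find?, hm.1, hm.2]
        simp only [hfp, Option.or, pvAStep, if_pos hc, List.getElem_modify, hay, if_pos rfl,
          hax, Option.map_none, Option.getD_none, Option.map_some, Option.getD_some]
        simp
      · have hfp : List.find? (fun p => p.2.1 == min_x + (ax : Int) && p.2.2 == min_y + (ay : Int)) [p]
            = none := by
          simp only [List.find?]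
          have : (p.2.1 == min_x + (ax : Int) && p.2.2 == min_y + (ay : Int)) = false := by
            simp only [Bool.and_eq_false_iff, beq_eq_false_iff_ne]; tauto
          simp [this]
        -- the step leaves this cell unchanged
        by_cases hc : min_x ≤ p.2.1 ∧ p.2.1 ≤ max_x ∧ min_y ≤ p.2.2 ∧ p.2.2 ≤ max_y
        · by_cases hA : (p.2.2 - min_y).toNat = ay
          · have hX : (p.2.1 - min_x).toNat ≠ ax := by
              intro hX; exact hm ⟨by omega, by omega⟩
            simp only [hfp, Option.or, pvAStep, if_pos hc, List.getElem_modify, hA,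
              Option.map_none, Option.getD_none]
            simp [hX]
          · simp only [hfp, Option.or, pvAStep, if_pos hc, List.getElem_modify, if_neg hA,
              Option.map_none, Option.getD_none]
        · simp only [hfp, Option.or, pvAStep, if_neg hc, Option.map_none, Option.getD_none]

-- ===== VERDICT =====
theorem build_board_array_spec : Claim_equal_build_board_array := by
  intro pieces min_x max_x min_y max_y _
  unfold Spec_build_board_array build_board_array build_board_array_alt
  obtain ⟨hlen, hrow, hpt⟩ := pvInv min_x max_x min_y max_y pieces
    ((List.range (max_y - min_y + 1).toNat).map
      (fun _ => (List.range (max_x - min_x + 1).toNat).map (fun _ => ".")))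
    (by simp) (by intro i h; simp)
  apply List.ext_getElem
  · rw [hlen, List.length_map, PySem.List.length_pyRange_one]
    congr 1; omega
  · intro y h1 h2
    have hy0 : y < (max_y - min_y + 1).toNat := by
      simpa [PySem.List.length_pyRange_one, show max_y + 1 - min_y = max_y - min_y + 1 by omega] using h2
    apply List.ext_getElem
    · rw [hrow y h1]
      simp only [List.getElem_map, List.length_map, PySem.List.length_pyRange_one]
      congr 1; omega
    · intro x hx1 hx2
      have hx0 : x < (max_x - min_x + 1).toNat := by
        simpa [PySem.List.length_pyRange_one, show max_x + 1 - min_x = max_x - min_x + 1 by omega] using hx2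
      have hy' : y < ((List.range (max_y - min_y + 1).toNat).map
          (fun _ => (List.range (max_x - min_x + 1).toNat).map (fun _ => "."))).length := by
        simpa using hy0
      have hx' : x < (((List.range (max_y - min_y + 1).toNat).map
          (fun _ => (List.range (max_x - min_x + 1).toNat).map (fun _ => ".")))[y]'hy').length := by
        simpa using hx0
      rw [hpt y x h1 hx1 hy' hx']
      simp only [List.getElem_map, PySem.List.getElem_pyRange_one]
      rw [pvCell_eq_find?]
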